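-- pv_equiv track=rewrite | github.com/Ugi0/AOC | y2022/22.py | parseIntoIntructions
-- ===== SOURCE A (Python) =====
-- def parseIntoIntructions(inst):
--     li = []
--     while len(inst) != 0:
--         i = 1
--         while inst[:i].isnumeric() and i <= len(inst):
--             i += 1
--         li.append((inst[:i-1],inst[i-1:i]))
--         inst = inst[i:]
--     return [x for x in li if x != ""]
-- ===== SOURCE B (Python) =====
-- def parseIntoIntructions(inst):
--     res = []
--     num = ''
--     for ch in inst:
--         if ch.isdigit():
--             num += ch
--         else:
--             res.append((num, ch))
--             num = ''
--     if num:
--         res.append((num, ''))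
--     return res
-- ===== Notes on version B (the rewrite author's own statement) =====
-- stated objective: faster
-- what changed: A repeatedly re-slices the string and re-tests growing prefixes with isnumeric (quadratic rescanning); B tokenizes in one linear pass over the characters, accumulating the current digit run and flushing it at each non-digit.
import Mathlib
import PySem

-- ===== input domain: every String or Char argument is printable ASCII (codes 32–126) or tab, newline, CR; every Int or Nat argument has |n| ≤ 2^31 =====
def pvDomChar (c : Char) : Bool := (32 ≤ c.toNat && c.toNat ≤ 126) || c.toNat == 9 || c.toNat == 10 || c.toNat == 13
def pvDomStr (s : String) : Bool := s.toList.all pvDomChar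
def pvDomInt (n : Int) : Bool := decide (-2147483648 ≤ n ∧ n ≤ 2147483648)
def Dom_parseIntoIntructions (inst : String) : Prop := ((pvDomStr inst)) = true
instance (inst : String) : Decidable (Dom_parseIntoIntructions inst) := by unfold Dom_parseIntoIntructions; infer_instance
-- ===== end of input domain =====

-- B replaces A's quadratic slice-and-rescan loop by a single linear scan accumulating the current digit run.

-- ===== PORT A =====
-- inner while loop: `while inst[:i].isnumeric() and i <= len(inst): i += 1`
-- (Python's str.isnumeric coincides with str.isdigit on the printable-ASCII domain; ported as strIsdigit)
def pvAInner (l : List Char) (i : Nat) : Nat :=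
  if h : PySem.Chars.strIsdigit (PySem.List.slice l none (some (i : Int))) = true ∧ i ≤ l.length
  then pvAInner l (i + 1)
  else i
termination_by l.length + 1 - i
decreasing_by omega

-- the port cites this for the outer loop's termination (inst[i:] with i ≥ 1 is strictly shorter)
theorem pvAInner_ge (l : List Char) (i : Nat) : i ≤ pvAInner l i := by
  rw [pvAInner]
  split
  · exact Nat.le_trans (Nat.le_succ i) (pvAInner_ge l (i + 1))
  · exact Nat.le_refl i
termination_by l.length + 1 - i
decreasing_by omega

-- outer while loop: li.append((inst[:i-1], inst[i-1:i])); inst = inst[i:]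
def pvALoop (l : List Char) (acc : List (String × String)) : List (String × String) :=
  if _hl : l.length ≠ 0 then
    let i := pvAInner l 1
    pvALoop (PySem.List.slice l (some (i : Int)) none)
      (acc ++ [(String.ofList (PySem.List.slice l none (some ((i : Int) - 1))),
                String.ofList (PySem.List.slice l (some ((i : Int) - 1)) (some (i : Int))))])
  else acc
termination_by l.length
decreasing_by
  have h1 : 1 ≤ pvAInner l 1 := pvAInner_ge l 1
  rw [PySem.List.slice_from_natCast, List.length_drop]
  omega

def parseIntoIntructions (inst : String) : List (String × String) :=
  -- `[x for x in li if x != ""]`: a tuple never equals the string "", so the filter keeps every element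
  (pvALoop inst.toList []).filter (fun _x => true)

-- ===== PORT B =====
def pvBStep (st : List (String × String) × List Char) (ch : Char) : List (String × String) × List Char :=
  if PySem.Chars.isdigit ch then (st.1, st.2 ++ [ch])
  else (st.1 ++ [(String.ofList st.2, String.ofList [ch])], [])

def parseIntoIntructions_alt (inst : String) : List (String × String) :=
  let st := inst.toList.foldl pvBStep ([], [])
  if st.2.isEmpty then st.1 else st.1 ++ [(String.ofList st.2, "")]

-- ===== PRECONDITION & SPEC =====
def Spec_parseIntoIntructions (inst : String) (out : List (String × String)) : Prop := out = parseIntoIntructions_alt inst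
instance (inst : String) (out : List (String × String)) : Decidable (Spec_parseIntoIntructions inst out) := by unfold Spec_parseIntoIntructions; infer_instance

-- ===== CLAIM (what is proved, stated in full; the proofs are below) =====
def Claim_equal_parseIntoIntructions : Prop := ∀ (inst : String), Dom_parseIntoIntructions inst → Spec_parseIntoIntructions inst (parseIntoIntructions inst)

-- ===== LEMMAS AND PROOFS =====

theorem pv_dropWhile_eq_drop (p : Char → Bool) (l : List Char) :
    l.drop (l.takeWhile p).length = l.dropWhile p := by
  have h := List.takeWhile_append_dropWhile (p := p) (l := l)
  calc l.drop (l.takeWhile p).length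
      = (l.takeWhile p ++ l.dropWhile p).drop (l.takeWhile p).length := by rw [h]
    _ = l.dropWhile p := List.drop_left

theorem pv_takeWhile_eq_take (p : Char → Bool) (l : List Char) :
    l.take (l.takeWhile p).length = l.takeWhile p :=
  (List.prefix_iff_eq_take.mp (List.takeWhile_prefix p)).symm

theorem pv_len_takeWhile_le (p : Char → Bool) (l : List Char) :
    (l.takeWhile p).length ≤ l.length :=
  (List.takeWhile_sublist p).length_le

theorem pv_nondigit_at (p : Char → Bool) (l : List Char) (h : (l.takeWhile p).length < l.length) :
    p (l[(l.takeWhile p).length]'h) = false := by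
  have hne : l.dropWhile p ≠ [] := by
    rw [← pv_dropWhile_eq_drop, List.ne_nil_iff_length_pos, List.length_drop]; omega
  have h1 := List.head_dropWhile_not p hne
  have h2 : (l.dropWhile p).head hne = l[(l.takeWhile p).length]'h := by
    simp only [List.head_eq_getElem, ← pv_dropWhile_eq_drop, List.getElem_drop, Nat.add_zero]
  rw [h2] at h1
  exact h1

-- A's inner loop stops exactly one past the leading digit run
theorem pvAInner_eq (l : List Char) (i : Nat) (h1 : 1 ≤ i)
    (h2 : i ≤ (l.takeWhile PySem.Chars.isdigit).length + 1) :
    pvAInner l i = (l.takeWhile PySem.Chars.isdigit).length + 1 := by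
  have hk : (l.takeWhile PySem.Chars.isdigit).length ≤ l.length :=
    pv_len_takeWhile_le PySem.Chars.isdigit l
  rw [pvAInner]
  split
  case isTrue h =>
    obtain ⟨hsd, hle⟩ := h
    refine pvAInner_eq l (i + 1) (by omega) ?_
    rcases Nat.lt_or_ge i ((l.takeWhile PySem.Chars.isdigit).length + 1) with hlt | hge
    · omega
    · exfalso
      have hie : i = (l.takeWhile PySem.Chars.isdigit).length + 1 := by omega
      have hkl : (l.takeWhile PySem.Chars.isdigit).length < l.length := by omega
      have hmem : l[(l.takeWhile PySem.Chars.isdigit).length]'hkl ∈ l.take i := by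
        have hkt : (l.takeWhile PySem.Chars.isdigit).length < (l.take i).length := by
          rw [List.length_take]; omega
        have hg : (l.take i)[(l.takeWhile PySem.Chars.isdigit).length]'hkt
            = l[(l.takeWhile PySem.Chars.isdigit).length]'hkl := List.getElem_take
        rw [← hg]
        exact List.getElem_mem hkt
      have hall := hsd
      rw [PySem.List.slice_to_natCast] at hall
      simp only [PySem.Chars.strIsdigit, Bool.and_eq_true, List.all_eq_true] at hall
      have hbad := hall.2 _ hmem
      rw [pv_nondigit_at PySem.Chars.isdigit l hkl] at hbad
      exact Bool.false_ne_true hbad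
  case isFalse h =>
    rcases Nat.lt_or_ge i ((l.takeWhile PySem.Chars.isdigit).length + 1) with hlt | hge
    · exfalso
      apply h
      constructor
      · rw [PySem.List.slice_to_natCast]
        simp only [PySem.Chars.strIsdigit, Bool.and_eq_true, List.all_eq_true]
        constructor
        · simp [List.ne_nil_iff_length_pos]; omega
        · intro x hx
          have hsub : (l.takeWhile PySem.Chars.isdigit).take i = l.take i := by
            conv_lhs => rw [← pv_takeWhile_eq_take PySem.Chars.isdigit l]
            rw [List.take_take]
            congr 1
            omega
          rw [← hsub] at hx
          exact List.mem_takeWhile_imp (List.mem_of_mem_take hx)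
      · omega
    · omega
termination_by l.length + 1 - i
decreasing_by omega

-- B's fold swallows a whole digit run into the accumulator
theorem pv_foldl_digits (ds : List Char) (rest : List Char) (acc : List (String × String)) (num : List Char)
    (hd : ∀ c ∈ ds, PySem.Chars.isdigit c = true) :
    (ds ++ rest).foldl pvBStep (acc, num) = rest.foldl pvBStep (acc, num ++ ds) := by
  induction ds generalizing num with
  | nil => simp
  | cons c t ih =>
      simp only [List.cons_append, List.foldl_cons, pvBStep, hd c (by simp), if_pos]
      rw [ih (fun x hx => hd x (by simp [hx])) (num := num ++ [c])]
      simp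

-- the heart of the proof: A's outer loop is B's single fold plus the final flush
theorem pvALoop_eq (l : List Char) (acc : List (String × String)) :
    pvALoop l acc =
      (if (l.foldl pvBStep (acc, ([] : List Char))).2.isEmpty
       then (l.foldl pvBStep (acc, ([] : List Char))).1
       else (l.foldl pvBStep (acc, ([] : List Char))).1 ++
            [(String.ofList (l.foldl pvBStep (acc, ([] : List Char))).2, "")]) := by
  rw [pvALoop]
  by_cases hl : l.length ≠ 0
  · rw [dif_pos hl]
    have hi : pvAInner l 1 = (l.takeWhile PySem.Chars.isdigit).length + 1 :=
      pvAInner_eq l 1 (Nat.le_refl 1) (by omega)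
    have hsplit := List.takeWhile_append_dropWhile (p := PySem.Chars.isdigit) (l := l)
    have hk : (l.takeWhile PySem.Chars.isdigit).length ≤ l.length :=
      pv_len_takeWhile_le PySem.Chars.isdigit l
    have hcast : ((((l.takeWhile PySem.Chars.isdigit).length + 1 : Nat) : Int) - 1)
        = (((l.takeWhile PySem.Chars.isdigit).length : Nat) : Int) := by push_cast; ring
    simp only [hi]
    rw [hcast, PySem.List.slice_to_natCast, PySem.List.slice_natCast,
        PySem.List.slice_from_natCast, Nat.add_sub_cancel_left,
        pv_takeWhile_eq_take PySem.Chars.isdigit l]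
    rcases hrest : l.dropWhile PySem.Chars.isdigit with _ | ⟨c, rest'⟩
    · -- the whole remainder is digits: A emits (l, '') and stops; B's fold ends with num = l
      have hdsl : l.takeWhile PySem.Chars.isdigit = l := by
        rw [hrest, List.append_nil] at hsplit; exact hsplit
      have hd : ∀ x ∈ l, PySem.Chars.isdigit x = true := fun x hx =>
        List.mem_takeWhile_imp (l := l) (by rw [hdsl]; exact hx)
      have hfold : l.foldl pvBStep (acc, ([] : List Char)) = (acc, l) := by
        have h0 := pv_foldl_digits l [] acc [] hd
        simpa using h0
      rw [hfold]
      have hke : (l.takeWhile PySem.Chars.isdigit).length = l.length := by rw [hdsl]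
      rw [hke, List.drop_length]
      have hdl : l.drop (l.length + 1) = [] := by
        rw [List.drop_eq_nil_iff]; omega
      rw [hdl, hdsl, pvALoop]
      have hne : l.isEmpty = false := by
        rw [List.isEmpty_eq_false_iff, List.ne_nil_iff_length_pos]; omega
      simp [hne]
    · -- a non-digit follows the digit run: A emits (run, c) and loops on the tail; B's fold flushes at c
      have hdk : l.drop (l.takeWhile PySem.Chars.isdigit).length = c :: rest' := by
        rw [pv_dropWhile_eq_drop, hrest]
      have hc : PySem.Chars.isdigit c = false := by
        have hne : l.dropWhile PySem.Chars.isdigit ≠ [] := by rw [hrest]; simp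
        have h1 := List.head_dropWhile_not PySem.Chars.isdigit hne
        simp only [hrest, List.head_cons] at h1
        exact h1
      have hlen : l.length = (l.takeWhile PySem.Chars.isdigit).length + 1 + rest'.length := by
        have := congrArg List.length hsplit
        rw [hrest] at this
        simp at this
        omega
      have hd1 : l.drop ((l.takeWhile PySem.Chars.isdigit).length + 1) = rest' := by
        rw [← List.drop_drop, hdk]
        simp
      have ht1 : (l.drop (l.takeWhile PySem.Chars.isdigit).length).take 1 = [c] := by
        rw [hdk]; simp
      have hfold : l.foldl pvBStep (acc, ([] : List Char)) =
          rest'.foldl pvBStep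
            (acc ++ [(String.ofList (l.takeWhile PySem.Chars.isdigit), String.ofList [c])], []) := by
        conv_lhs => rw [← hsplit]
        rw [hrest,
          pv_foldl_digits _ _ _ _ (fun x hx => List.mem_takeWhile_imp hx)]
        simp [pvBStep, hc]
      rw [hd1, ht1, hfold,
        pvALoop_eq rest' (acc ++ [(String.ofList (l.takeWhile PySem.Chars.isdigit), String.ofList [c])])]
  · rw [dif_neg hl]
    have hnil : l = [] := by rw [← List.length_eq_zero_iff]; omega
    subst hnil
    simp
termination_by l.length
decreasing_by omega

-- ===== VERDICT (by name: the statement is the Claim_ definition above) =====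
theorem parseIntoIntructions_spec : Claim_equal_parseIntoIntructions := by
  intro inst _hdom
  unfold Spec_parseIntoIntructions parseIntoIntructions parseIntoIntructions_alt
  rw [List.filter_true]
  exact pvALoop_eq inst.toList []
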